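-- pv_equiv track=rewrite | github.com/CorradoBarazzutti/CSDcompressor | src/utilities/neighbours.py | d_infinity_neighbors
-- ===== SOURCE A (Python) =====
-- import itertools
--
-- def d_infinity_neighbors(point: tuple, shape: list, distance: int = 1) -> list:
--     """
--     This method generates the coordinates of the d-infinity neighbors of a given point in a n-dimensional space.
--     The d-infinity neighbors are the points that are at a distance of d from the given point by the d-infinity norm:
--     ||x - y|| = max(|x_i - y_i|).
--
--     To achieve this, the method uses itertools.product Cartesian product of your current location with each coordinate
--     perturbed by d in each direction.
--
--     E.g. d = 1. You'll have a list of triples derived from your current point as such: diag_coord = [(x-1, x, x+1) for x in point]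
--     Now, you take the product of all those triples, recombine each set, and you have your diagonals.
--
--     :param point: tuple representing the point
--     :param shape: list representing the dimensions of the space
--     :param distance: the distance from the point
--
--     :return: list of tuples representing the coordinates of the d-infinity neighbors points of the given point
--     """
--     if distance < 0:
--         raise ValueError('Distance must be a positive integer')
--     # TODO: implement for d > 1
--     if distance != 1:
--         raise ValueError('Not implemented yet')
--
--     # compute the number of dimensions
--     dimension = len(shape)
--
--     # init neighbors list
--     neighbors = []
--
--     # generate the neighbors
--     for delta in itertools.product([-1, 0, 1], repeat=dimension):
--         # if the delta is the null vector, skip it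
--         if all([x == 0 for x in delta]):
--             continue
--         # get the coordinates of the neighbor
--         neighbor = tuple([point[i] + delta[i] for i in range(dimension)])
--         # check if the neighbor is in the simulator space
--         if all(0 <= neighbor[i] < shape[i] for i in range(dimension)):
--             neighbors.append(neighbor)
--
--     return neighbors
-- ===== SOURCE B (Python) =====
-- import itertools
--
-- def d_infinity_neighbors(point: tuple, shape: list, distance: int = 1) -> list:
--     if distance < 0:
--         raise ValueError('Distance must be a positive integer')
--     if distance != 1:
--         raise ValueError('Not implemented yet')
--     dimension = len(shape)
--     # per-axis valid coordinates, in (-1, 0, +1) order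
--     valid = [[point[i] + d for d in (-1, 0, 1) if 0 <= point[i] + d < shape[i]]
--              for i in range(dimension)]
--     center = tuple(point[:dimension])
--     return [combo for combo in itertools.product(*valid) if combo != center]
-- ===== Notes on version B (the rewrite author's own statement) =====
-- stated objective: alternative
-- what changed: B filters each axis down to its in-bounds coordinates first and takes the Cartesian product of those short per-axis lists (skipping the center point), instead of enumerating all 3^d delta vectors and bounds-checking each full candidate tuple.
import Mathlib
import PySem

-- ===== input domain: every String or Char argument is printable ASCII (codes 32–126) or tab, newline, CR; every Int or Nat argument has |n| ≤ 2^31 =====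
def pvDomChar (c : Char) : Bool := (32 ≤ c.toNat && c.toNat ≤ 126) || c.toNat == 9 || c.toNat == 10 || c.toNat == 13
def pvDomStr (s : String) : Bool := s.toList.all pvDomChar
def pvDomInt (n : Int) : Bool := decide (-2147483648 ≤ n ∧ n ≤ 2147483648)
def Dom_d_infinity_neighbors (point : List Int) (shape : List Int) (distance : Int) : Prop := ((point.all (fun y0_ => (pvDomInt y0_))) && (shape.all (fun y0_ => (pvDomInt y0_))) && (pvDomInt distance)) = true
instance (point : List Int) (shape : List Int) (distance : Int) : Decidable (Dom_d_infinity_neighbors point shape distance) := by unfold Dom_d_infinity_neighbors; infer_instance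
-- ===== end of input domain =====

-- B filters each axis to its in-bounds coordinates first and takes the product of those
-- short per-axis lists, instead of enumerating all 3^d deltas and bounds-checking each
-- full tuple (objective: alternative decomposition; same output, same order).

-- ===== PORT A =====
-- itertools.product([-1, 0, 1], repeat=n)
def pyProd3 : Nat → List (List Int)
  | 0 => [[]]
  | n + 1 => ([-1, 0, 1] : List Int).flatMap (fun x => (pyProd3 n).map (fun rest => x :: rest))

-- Indexing point[i]/delta[i]/neighbor[i]/shape[i] is ported as List.getD with default 0:
-- exact because every index used lies in range on inputs admitted by Pre_.
def d_infinity_neighbors (point : List Int) (shape : List Int) (distance : Int) : List (List Int) :=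
  if distance < 0 then []          -- Python: raise ValueError (excluded by Pre_)
  else if ¬ (distance = 1) then [] -- Python: raise ValueError (excluded by Pre_)
  else
    let dimension := shape.length
    (pyProd3 dimension).foldl
      (fun neighbors delta =>
        if delta.all (fun x => x == 0) then neighbors
        else
          let neighbor := (List.range dimension).map (fun i => point.getD i 0 + delta.getD i 0)
          if (List.range dimension).all
               (fun i => decide (0 ≤ neighbor.getD i 0) && decide (neighbor.getD i 0 < shape.getD i 0))
          then neighbors ++ [neighbor] else neighbors)
      []

-- ===== PORT B =====
-- itertools.product(*valid)
def prodLists : List (List Int) → List (List Int)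
  | [] => [[]]
  | xs :: rest => xs.flatMap (fun x => (prodLists rest).map (fun t => x :: t))

def d_infinity_neighbors_alt (point : List Int) (shape : List Int) (distance : Int) : List (List Int) :=
  if distance < 0 then []          -- Python: raise ValueError (excluded by Pre_)
  else if ¬ (distance = 1) then [] -- Python: raise ValueError (excluded by Pre_)
  else
    let dimension := shape.length
    let valid := (List.range dimension).map (fun i =>
      (([-1, 0, 1] : List Int).filter
          (fun d => decide (0 ≤ point.getD i 0 + d) && decide (point.getD i 0 + d < shape.getD i 0))).map
        (fun d => point.getD i 0 + d))
    let center := point.take dimension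
    (prodLists valid).filter (fun combo => combo != center)

-- ===== PRECONDITION & SPEC =====
-- Pre_ excludes exactly the inputs where the Python A raises: distance ≠ 1 (both ValueError
-- guards) and points with fewer coordinates than shape has dimensions (IndexError on point[i]).
def Pre_d_infinity_neighbors (point : List Int) (shape : List Int) (distance : Int) : Prop :=
  distance = 1 ∧ shape.length ≤ point.length
instance (point : List Int) (shape : List Int) (distance : Int) : Decidable (Pre_d_infinity_neighbors point shape distance) := by unfold Pre_d_infinity_neighbors; infer_instance

def pvWitness_d_infinity_neighbors : List Int × List Int × Int := ([0, 1], [2, 3], 1)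

def Spec_d_infinity_neighbors (point : List Int) (shape : List Int) (distance : Int) (out : List (List Int)) : Prop := out = d_infinity_neighbors_alt point shape distance
instance (point : List Int) (shape : List Int) (distance : Int) (out : List (List Int)) : Decidable (Spec_d_infinity_neighbors point shape distance out) := by unfold Spec_d_infinity_neighbors; infer_instance

-- ===== CLAIM (what is proved, stated in full; the proofs are below) =====
def Claim_equal_d_infinity_neighbors : Prop := ∀ (point : List Int) (shape : List Int) (distance : Int), Dom_d_infinity_neighbors point shape distance → Pre_d_infinity_neighbors point shape distance → Spec_d_infinity_neighbors point shape distance (d_infinity_neighbors point shape distance)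

-- ===== LEMMAS AND PROOFS =====

-- every tuple produced by itertools.product([-1,0,1], repeat=n) has length n
theorem length_of_mem_pyProd3 (n : Nat) (δ : List Int) (h : δ ∈ pyProd3 n) : δ.length = n := by
  induction n generalizing δ with
  | zero => simp [pyProd3] at h; simp [h]
  | succ n ih =>
    rw [pyProd3, List.mem_flatMap] at h
    obtain ⟨x, _, hmem⟩ := h
    rw [List.mem_map] at hmem
    obtain ⟨t, ht, rfl⟩ := hmem
    simp [ih t ht]

-- A's conditional-append loop is a filter + map
theorem foldl_if_if {α : Type} (c1 : α → Bool) (c2 : α → Bool) (f : α → List Int) :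
    ∀ (l : List α) (init : List (List Int)),
      l.foldl (fun acc x => if c1 x then acc else if c2 x then acc ++ [f x] else acc) init
        = init ++ ((l.filter (fun x => !c1 x && c2 x)).map f) := by
  intro l
  induction l with
  | nil => simp
  | cons a l ih =>
    intro init
    simp only [List.foldl_cons, List.filter_cons]
    cases h1 : c1 a <;> cases h2 : c2 a <;> simp [ih]

-- the recursive forms the proof works with
def axisList (p s : Int) : List Int :=
  (([-1, 0, 1] : List Int).filter (fun d => decide (0 ≤ p + d) && decide (p + d < s))).map (fun d => p + d)

def validsRec : List Int → List Int → List (List Int)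
  | _, [] => []
  | [], _ :: _ => []
  | p :: ps, s :: ss => axisList p s :: validsRec ps ss

def chk : List Int → List Int → Bool
  | x :: xs, s :: ss => (decide (0 ≤ x) && decide (x < s)) && chk xs ss
  | _, _ => true

theorem nb_eq (δ : List Int) : ∀ (point : List Int), δ.length ≤ point.length →
    (List.range δ.length).map (fun i => point.getD i 0 + δ.getD i 0)
      = List.zipWith (· + ·) point δ := by
  induction δ with
  | nil => simp
  | cons d δ ih =>
    intro point h
    cases point with
    | nil => simp at h
    | cons p ps =>
      simp only [List.length_cons, List.range_succ_eq_map, List.map_cons, List.map_map,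
        List.zipWith_cons_cons, List.cons.injEq]
      refine ⟨by simp, ?_⟩
      simp only [Function.comp_def, List.getD_cons_succ]
      exact ih ps (by simpa using h)

theorem chk_eq (shape : List Int) : ∀ (nb : List Int), nb.length = shape.length →
    (List.range shape.length).all
        (fun i => decide (0 ≤ nb.getD i 0) && decide (nb.getD i 0 < shape.getD i 0))
      = chk nb shape := by
  induction shape with
  | nil => intro nb h; simp [chk]
  | cons s ss ih =>
    intro nb h
    cases nb with
    | nil => simp at h
    | cons x xs =>
      simp only [List.length_cons, List.range_succ_eq_map, List.all_cons, List.all_map, chk]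
      rw [← ih xs (by simpa using h)]
      rfl

theorem az_iff (δ : List Int) : ∀ (point : List Int), δ.length ≤ point.length →
    (δ.all (fun x => x == 0)) = (List.zipWith (· + ·) point δ == point.take δ.length) := by
  induction δ with
  | nil => simp
  | cons d δ ih =>
    intro point h
    cases point with
    | nil => simp at h
    | cons p ps =>
      simp only [List.all_cons, List.length_cons, List.take_succ_cons, List.zipWith_cons_cons,
        List.cons_beq_cons]
      rw [← ih ps (by simpa using h)]
      have : (p + d == p) = (d == 0) := by
        cases h' : (d == 0) <;> simp_all
      rw [this]

theorem valids_eq (shape : List Int) : ∀ (point : List Int), shape.length ≤ point.length →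
    (List.range shape.length).map (fun i =>
        (([-1, 0, 1] : List Int).filter
            (fun d => decide (0 ≤ point.getD i 0 + d) && decide (point.getD i 0 + d < shape.getD i 0))).map
          (fun d => point.getD i 0 + d))
      = validsRec point shape := by
  induction shape with
  | nil => intro point h; simp [validsRec]
  | cons s ss ih =>
    intro point h
    cases point with
    | nil => simp at h
    | cons p ps =>
      simp only [List.length_cons, List.range_succ_eq_map, List.map_cons, List.map_map, validsRec,
        List.cons.injEq]
      refine ⟨by simp [axisList], ?_⟩
      simp only [Function.comp_def, List.getD_cons_succ]
      exact ih ps (by simpa using h)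

-- filter with a condition that is constant in the element
theorem filter_and_const {α : Type} (b : Bool) (c : α → Bool) (l : List α) :
    l.filter (fun x => b && c x) = if b then l.filter c else [] := by
  cases b <;> simp

-- one head-axis slab of the product, filtered and shifted
theorem crux_aux (p s : Int) (ps ss : List Int)
    (hIH : ((pyProd3 ss.length).filter (fun δ => chk (List.zipWith (· + ·) ps δ) ss)).map
            (fun δ => List.zipWith (· + ·) ps δ) = prodLists (validsRec ps ss)) :
    ∀ (D : List Int),
      ((D.flatMap (fun x => (pyProd3 ss.length).map (fun t => x :: t))).filter
          (fun δ => chk (List.zipWith (· + ·) (p :: ps) δ) (s :: ss))).map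
        (fun δ => List.zipWith (· + ·) (p :: ps) δ)
      = ((D.filter (fun d => decide (0 ≤ p + d) && decide (p + d < s))).map (fun d => p + d)).flatMap
          (fun v => (prodLists (validsRec ps ss)).map (fun t => v :: t)) := by
  intro D
  induction D with
  | nil => simp
  | cons d D ihD =>
    simp only [List.flatMap_cons, List.filter_append, List.map_append, List.filter_cons]
    rw [List.filter_map, List.map_map]
    have hpred : ((fun δ => chk (List.zipWith (· + ·) (p :: ps) δ) (s :: ss)) ∘ (fun t => d :: t))
        = fun δ => (decide (0 ≤ p + d) && decide (p + d < s)) && chk (List.zipWith (· + ·) ps δ) ss := by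
      funext δ; simp [chk]
    rw [hpred, filter_and_const]
    by_cases hc : (decide (0 ≤ p + d) && decide (p + d < s)) = true
    · simp only [hc, if_pos, List.map_cons, List.flatMap_cons]
      rw [ihD]
      congr 1
      rw [← hIH, List.map_map]
      rfl
    · simp only [Bool.not_eq_true] at hc
      simp [hc, ihD]

-- the crux: the bounds-filtered full product, shifted to coordinates, IS the product of
-- the per-axis filtered coordinate lists
theorem prodEq (shape : List Int) : ∀ (point : List Int), shape.length ≤ point.length →
    ((pyProd3 shape.length).filter (fun δ => chk (List.zipWith (· + ·) point δ) shape)).map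
        (fun δ => List.zipWith (· + ·) point δ)
      = prodLists (validsRec point shape) := by
  induction shape with
  | nil =>
    intro point h
    cases point <;> simp [pyProd3, chk, validsRec, prodLists]
  | cons s ss ih =>
    intro point h
    cases point with
    | nil => simp at h
    | cons p ps =>
      have hIH := ih ps (by simpa using h)
      simp only [List.length_cons, pyProd3]
      rw [crux_aux p s ps ss hIH]
      simp [validsRec, prodLists, axisList, List.flatMap_map]

-- the two loop bodies agree once distance = 1 and point covers every dimension
theorem main_eq (point shape : List Int) (h : shape.length ≤ point.length) :
    d_infinity_neighbors point shape 1 = d_infinity_neighbors_alt point shape 1 := by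
  unfold d_infinity_neighbors d_infinity_neighbors_alt
  have h0 : ¬((1:Int) < 0) := by norm_num
  have h1 : ¬¬((1:Int) = 1) := by simp
  rw [if_neg h0, if_neg h1, if_neg h0, if_neg h1]
  simp only []
  rw [foldl_if_if (fun (δ : List Int) => δ.all (fun x => x == 0))
        (fun (δ : List Int) => (List.range shape.length).all
          (fun i => decide (0 ≤ ((List.range shape.length).map (fun j => point.getD j 0 + δ.getD j 0)).getD i 0)
            && decide (((List.range shape.length).map (fun j => point.getD j 0 + δ.getD j 0)).getD i 0 < shape.getD i 0)))
        (fun (δ : List Int) => (List.range shape.length).map (fun i => point.getD i 0 + δ.getD i 0))]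
  simp only [List.nil_append]
  rw [valids_eq shape point h]
  -- rewrite the filter predicate and the mapped function on members of pyProd3
  rw [List.filter_congr (q := fun δ =>
        !(List.zipWith (· + ·) point δ == point.take shape.length) && chk (List.zipWith (· + ·) point δ) shape)
      (by
        intro δ hδ
        have hlen : δ.length = shape.length := length_of_mem_pyProd3 _ _ hδ
        have hlep : δ.length ≤ point.length := hlen ▸ h
        have h1 := az_iff δ point hlep
        have h2 := nb_eq δ point hlep
        rw [hlen] at h1 h2
        rw [h2, chk_eq shape _ (by rw [List.length_zipWith, ← hlen]; omega), h1, ← hlen])]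
  rw [← List.filter_filter]
  rw [List.map_congr_left (f := fun δ => (List.range shape.length).map (fun i => point.getD i 0 + δ.getD i 0))
      (g := fun δ => List.zipWith (· + ·) point δ)
      (by
        intro δ hδ
        have hδ' : δ ∈ pyProd3 shape.length :=
          (List.mem_filter.mp (List.mem_filter.mp hδ).1).1
        have hlen : δ.length = shape.length := length_of_mem_pyProd3 _ _ hδ'
        have h2 := nb_eq δ point (hlen ▸ h)
        rw [hlen] at h2
        exact h2)]
  have hcomp : (fun δ => !(List.zipWith (· + ·) point δ == point.take shape.length))
      = ((fun nb => !(nb == point.take shape.length)) ∘ (fun δ => List.zipWith (· + ·) point δ)) := rfl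
  rw [hcomp, ← List.filter_map]
  rw [prodEq shape point h]
  rfl

-- ===== VERDICT (by name: the statement is the Claim_ definition above) =====
theorem d_infinity_neighbors_spec : Claim_equal_d_infinity_neighbors := by
  intro point shape distance _ hpre
  obtain ⟨hd, hlen⟩ := hpre
  subst hd
  exact main_eq point shape hlen
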